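-- pv_equiv track=rewrite | github.com/maxshchurr/leeeetcode | LeetCode_python/Easy/2363. Merge Similar Items.py | mergeSimilarItems
-- ===== SOURCE A (Python) =====
-- def mergeSimilarItems(items1: list[list[int]], items2: list[list[int]]) -> list[list[int]]:
--     res = [item for item in items1]
--     res_items = [item[0] for item in res]
--
--     to_add = []
--     added_items = []
--
--     for item in items2:
--         for i in range(len(res)):
--             if item[0] == res[i][0]:
--                 res[i][1] += item[1]
--             if item[0] not in res_items and item[0] not in added_items:
--                 to_add += [[item[0], item[1]]]
--                 added_items.append(item[0])
--
--     res.extend(to_add)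
--
--     return sorted(res)
-- ===== SOURCE B (Python) =====
-- def mergeSimilarItems(items1: list[list[int]], items2: list[list[int]]) -> list[list[int]]:
--     weight2 = {}
--     for item in items2:
--         weight2[item[0]] = weight2.get(item[0], 0) + item[1]
--     heads1 = {item[0] for item in items1}
--     merged = []
--     for item in items1:
--         row = list(item)
--         row[1] += weight2.get(row[0], 0)
--         merged.append(row)
--     merged += [[v, w] for v, w in weight2.items() if v not in heads1]
--     return sorted(merged)
-- ===== Notes on version B (the rewrite author's own statement) =====
-- stated objective: faster
-- what changed: Replaces A's inner scan of res for every items2 item (with O(n) membership tests on res_items/added_items inside that inner loop) by one dict of summed items2 weights, a set of items1 values, one pass over items1 and one sort; Pre_ excludes inputs with an inner list shorter than 2, on which B's item[1]/row[1] raises IndexError (A returns on some of them, e.g. when items1 is empty).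
-- intended difference: When items1 is empty and items2 is not, A returns [] (its inner loop never runs, silently dropping items2), and when items2 holds more than one entry for a value absent from items1, A keeps only the first such entry's weight; B returns the sorted fully-summed merge, the intended result in both cases. — e.g. on mergeSimilarItems([], [[1, 2]]): A returns [], B returns [[1, 2]]
-- outside the precondition, e.g. on mergeSimilarItems([[5]], []): A returns [[5]], B raises IndexError; on mergeSimilarItems([], [[5]]): A returns [], B raises IndexError; on mergeSimilarItems([[9, 9]], [[5, 3], [5]]): A returns [[5, 3], [9, 9]], B raises IndexError
import Mathlib
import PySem

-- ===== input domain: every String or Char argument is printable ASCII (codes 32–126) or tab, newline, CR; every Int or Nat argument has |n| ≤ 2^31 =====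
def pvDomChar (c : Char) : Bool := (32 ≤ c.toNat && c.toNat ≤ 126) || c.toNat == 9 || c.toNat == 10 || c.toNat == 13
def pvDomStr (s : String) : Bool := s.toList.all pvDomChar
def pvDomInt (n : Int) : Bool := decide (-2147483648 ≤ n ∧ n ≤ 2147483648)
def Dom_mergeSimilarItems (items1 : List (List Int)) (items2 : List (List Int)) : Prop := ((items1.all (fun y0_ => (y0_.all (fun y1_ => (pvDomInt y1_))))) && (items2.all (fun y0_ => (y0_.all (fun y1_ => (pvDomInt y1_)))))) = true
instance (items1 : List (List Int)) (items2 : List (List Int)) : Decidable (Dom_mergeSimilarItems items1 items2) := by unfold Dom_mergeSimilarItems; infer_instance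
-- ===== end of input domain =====

-- B replaces A's inner scan of res for every items2 item by one dict of summed items2 weights,
-- a set of items1 values, one pass over items1 and one sort.
-- A mutates items1's inner lists in place, B does not: the equivalence proved is about the RETURN value.

-- ===== PORT A =====
-- exact on Pre_: the pyGetD defaults (0 / []) stand for Python IndexErrors, which Pre_ excludes
-- res[i][1] += item[1]
def pvAUpd (item l : List Int) : List Int :=
  PySem.List.pySetD l 1 (PySem.List.pyGetD l 1 0 + PySem.List.pyGetD item 1 0)

-- the body of A's inner 'for i in range(len(res))' loop; state = (res, to_add, added_items)
def pvAStep (resItems : List Int) (item : List Int)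
    (st2 : List (List Int) × List (List Int) × List Int) (i : Int) :
    List (List Int) × List (List Int) × List Int :=
  let res2 := if PySem.List.pyGetD item 0 0 == PySem.List.pyGetD (PySem.List.pyGetD st2.1 i []) 0 0
    then PySem.List.pySetD st2.1 i (pvAUpd item (PySem.List.pyGetD st2.1 i []))
    else st2.1
  if !(resItems.contains (PySem.List.pyGetD item 0 0)) && !(st2.2.2.contains (PySem.List.pyGetD item 0 0))
    then (res2, st2.2.1 ++ [[PySem.List.pyGetD item 0 0, PySem.List.pyGetD item 1 0]],
          st2.2.2 ++ [PySem.List.pyGetD item 0 0])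
    else (res2, st2.2.1, st2.2.2)

-- one iteration of A's outer 'for item in items2' loop
def pvAItem (resItems : List Int) (st : List (List Int) × List (List Int) × List Int)
    (item : List Int) : List (List Int) × List (List Int) × List Int :=
  (PySem.List.pyRange 0 (st.1.length : Int) 1).foldl (pvAStep resItems item) st

def mergeSimilarItems (items1 : List (List Int)) (items2 : List (List Int)) : List (List Int) :=
  let res := items1.map (fun item => item)                       -- [item for item in items1]
  let resItems := res.map (fun item => PySem.List.pyGetD item 0 0)
  let st := items2.foldl (pvAItem resItems) (res, ([], []))
  PySem.List.sorted (st.1 ++ st.2.1) (fun x => x) false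

-- ===== PORT B =====
-- exact on Pre_: the pyGetD/pySetD defaults stand for Python IndexErrors, which Pre_ excludes
-- weight2[item[0]] = weight2.get(item[0], 0) + item[1]
def pvBTally (st : PySem.Dict Int Int) (item : List Int) : PySem.Dict Int Int :=
  st.insert (PySem.List.pyGetD item 0 0)
    (st.getD (PySem.List.pyGetD item 0 0) 0 + PySem.List.pyGetD item 1 0)

-- row = list(item); row[1] += weight2.get(row[0], 0)
def pvBRow (weight2 : PySem.Dict Int Int) (item : List Int) : List Int :=
  let row := item.map (fun x => x)
  PySem.List.pySetD row 1
    (PySem.List.pyGetD row 1 0 + weight2.getD (PySem.List.pyGetD row 0 0) 0)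

def mergeSimilarItems_alt (items1 : List (List Int)) (items2 : List (List Int)) : List (List Int) :=
  let weight2 := items2.foldl pvBTally PySem.Dict.empty
  let heads1 := PySem.Set.ofList (items1.map (fun item => PySem.List.pyGetD item 0 0))
  let merged := items1.foldl (fun acc item => acc ++ [pvBRow weight2 item]) []
  let merged2 := merged ++
    (weight2.items.filter (fun p => !(PySem.Set.contains heads1 p.1))).map (fun p => [p.1, p.2])
  PySem.List.sorted merged2 (fun x => x) false

-- ===== PRECONDITION & SPEC =====
-- Pre_ admits exactly the inputs whose inner lists all have a value and a weight (length ≥ 2):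
-- on any shorter entry B's row[1]/item[1] raises IndexError (and A raises on most of them too).
def Pre_mergeSimilarItems (items1 : List (List Int)) (items2 : List (List Int)) : Prop :=
  (∀ l ∈ items1, 2 ≤ l.length) ∧ (∀ l ∈ items2, 2 ≤ l.length)
instance (items1 : List (List Int)) (items2 : List (List Int)) : Decidable (Pre_mergeSimilarItems items1 items2) := by unfold Pre_mergeSimilarItems; infer_instance
def pvWitness_mergeSimilarItems : List (List Int) × List (List Int) := ([[1, 2], [4, 3]], [[1, 3], [2, 5]])

-- When items1 is empty and items2 is not, A returns [] (its inner loop never runs, silently dropping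
-- items2), and when items2 repeats a value absent from items1 with nonzero weights after the first,
-- A keeps only the first occurrence's weight; B returns the sorted fully-summed merge, the intended
-- result in both cases.
def D_mergeSimilarItems (items1 : List (List Int)) (items2 : List (List Int)) : Prop :=
  (items1 = [] ∧ items2 ≠ []) ∨
  (∃ l ∈ items2, l.headD 0 ∉ items1.map (fun t => t.headD 0) ∧
    1 < items2.countP (fun t => t.headD 0 == l.headD 0))
instance (items1 : List (List Int)) (items2 : List (List Int)) : Decidable (D_mergeSimilarItems items1 items2) := by unfold D_mergeSimilarItems; infer_instance

def Spec_mergeSimilarItems (items1 : List (List Int)) (items2 : List (List Int)) (out : List (List Int)) : Prop :=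
  ¬ D_mergeSimilarItems items1 items2 → out = mergeSimilarItems_alt items1 items2
instance (items1 : List (List Int)) (items2 : List (List Int)) (out : List (List Int)) : Decidable (Spec_mergeSimilarItems items1 items2 out) := by unfold Spec_mergeSimilarItems; infer_instance

def pvDiffWitness_mergeSimilarItems : List (List Int) × List (List Int) := ([], [[1, 2]])
def pvDiffWitnessOut_mergeSimilarItems : (List (List Int)) × (List (List Int)) := ([], [[1, 2]])

-- ===== CLAIM (what is proved, stated in full; the proofs are below) =====
def Claim_unchanged_mergeSimilarItems : Prop := ∀ (items1 : List (List Int)) (items2 : List (List Int)), Dom_mergeSimilarItems items1 items2 → Pre_mergeSimilarItems items1 items2 → Spec_mergeSimilarItems items1 items2 (mergeSimilarItems items1 items2)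
def Claim_changed_mergeSimilarItems : Prop := Dom_mergeSimilarItems (pvDiffWitness_mergeSimilarItems.1) (pvDiffWitness_mergeSimilarItems.2) ∧ Pre_mergeSimilarItems (pvDiffWitness_mergeSimilarItems.1) (pvDiffWitness_mergeSimilarItems.2) ∧ D_mergeSimilarItems (pvDiffWitness_mergeSimilarItems.1) (pvDiffWitness_mergeSimilarItems.2) ∧ mergeSimilarItems (pvDiffWitness_mergeSimilarItems.1) (pvDiffWitness_mergeSimilarItems.2) = pvDiffWitnessOut_mergeSimilarItems.1 ∧ mergeSimilarItems_alt (pvDiffWitness_mergeSimilarItems.1) (pvDiffWitness_mergeSimilarItems.2) = pvDiffWitnessOut_mergeSimilarItems.2 ∧ pvDiffWitnessOut_mergeSimilarItems.1 ≠ pvDiffWitnessOut_mergeSimilarItems.2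

-- ===== LEMMAS AND PROOFS =====

-- xs[0] with default is the head with default
theorem pv_hd_eq (l : List Int) : PySem.List.pyGetD l 0 0 = l.headD 0 := by
  cases l <;> simp [PySem.List.pyGetD, PySem.List.pyGet?, PySem.List.pyIdx?]

theorem pv_g1_eq (l : List Int) : PySem.List.pyGetD l 1 0 = l.getD 1 0 := by
  rw [PySem.List.pyGetD_of_nonneg l 0 (by norm_num)]
  norm_num

theorem pv_getD_idx (xs : List (List Int)) (i : Int) (h0 : 0 ≤ i) (h1 : i.toNat < xs.length) :
    PySem.List.pyGetD xs i [] = xs[i.toNat] := by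
  rw [PySem.List.pyGetD_of_nonneg xs [] h0]; exact List.getD_eq_getElem _ _ h1

theorem pv_set1_head (l : List Int) (v : Int) : (PySem.List.pySetD l 1 v).headD 0 = l.headD 0 := by
  rw [PySem.List.pySetD_of_nonneg l v (by norm_num)]
  cases l with
  | nil => rfl
  | cons a t => cases t <;> rfl

theorem pv_get1_cons (a b : Int) (t : List Int) : PySem.List.pyGetD (a :: b :: t) 1 0 = b := by
  simp [PySem.List.pyGetD, PySem.List.pyGet?, PySem.List.pyIdx?]

theorem pv_set1_cons (a b v : Int) (t : List Int) :
    PySem.List.pySetD (a :: b :: t) 1 v = a :: v :: t := by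
  rw [PySem.List.pySetD_of_nonneg _ _ (by norm_num)]
  rfl

-- A's inner loop, matched case: every entry whose head equals item[0] is updated in place,
-- nothing is appended (item[0] ∈ res_items)
theorem pv_A_inner_seg (resItems item : List Int)
    (hmem : resItems.contains (PySem.List.pyGetD item 0 0) = true) :
    ∀ (suff pref toAdd : List (List Int)) (added : List Int),
    (PySem.List.pyRange (pref.length : Int) ((pref.length : Int) + suff.length) 1).foldl
        (pvAStep resItems item) (pref ++ suff, toAdd, added)
    = (pref ++ suff.map (fun l =>
        if PySem.List.pyGetD item 0 0 == l.headD 0 then pvAUpd item l else l), toAdd, added) := by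
  intro suff
  induction suff with
  | nil =>
    intro pref toAdd added
    rw [show ((pref.length : Int) + (([] : List (List Int)).length : Int)) = (pref.length : Int) by simp,
        PySem.List.pyRange_one_eq_nil le_rfl]
    simp
  | cons l suff ih =>
    intro pref toAdd added
    rw [PySem.List.pyRange_one_cons (by simp only [List.length_cons]; push_cast; omega)]
    have hget : PySem.List.pyGetD (pref ++ l :: suff) (pref.length : Int) [] = l := by
      rw [pv_getD_idx _ _ (Int.natCast_nonneg _) (by simp)]
      simp
    have hstep : pvAStep resItems item (pref ++ l :: suff, toAdd, added) (pref.length : Int)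
        = ((pref ++ [if PySem.List.pyGetD item 0 0 == l.headD 0 then pvAUpd item l else l]) ++ suff,
           toAdd, added) := by
      unfold pvAStep
      rw [hget, pv_hd_eq l, hmem]
      simp only [Bool.not_true, Bool.false_and, Bool.false_eq_true, if_false]
      by_cases hc : (PySem.List.pyGetD item 0 0 == l.headD 0)
      · rw [if_pos hc, if_pos hc,
            PySem.List.pySetD_of_nonneg _ _ (Int.natCast_nonneg _)]
        simp
      · rw [if_neg hc, if_neg hc]
        simp
    rw [List.foldl_cons, hstep]
    have harg : (pref.length : Int) + (((l :: suff).length : Nat) : Int)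
        = (((pref ++ [if PySem.List.pyGetD item 0 0 == l.headD 0 then pvAUpd item l else l]).length : Nat) : Int)
          + (suff.length : Int) := by
      simp; omega
    have harg2 : (pref.length : Int) + 1
        = (((pref ++ [if PySem.List.pyGetD item 0 0 == l.headD 0 then pvAUpd item l else l]).length : Nat) : Int) := by
      simp
    rw [harg, harg2,
        ih (pref ++ [if PySem.List.pyGetD item 0 0 == l.headD 0 then pvAUpd item l else l]) toAdd added]
    rw [List.map_cons]
    simp

theorem pv_A_inner_match (resItems item : List Int) (res toAdd : List (List Int)) (added : List Int)
    (hmem : resItems.contains (PySem.List.pyGetD item 0 0) = true) :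
    (PySem.List.pyRange 0 (res.length : Int) 1).foldl (pvAStep resItems item) (res, toAdd, added)
    = (res.map (fun l => if PySem.List.pyGetD item 0 0 == l.headD 0 then pvAUpd item l else l),
       toAdd, added) := by
  have := pv_A_inner_seg resItems item hmem res [] toAdd added
  simpa using this

-- A's inner loop does nothing once item[0] is in added_items and matches no head
theorem pv_A_inner_noop (resItems item : List Int) :
    ∀ (L : List Int) (res toAdd : List (List Int)) (added : List Int),
    (∀ l ∈ res, l.headD 0 ≠ PySem.List.pyGetD item 0 0) →
    added.contains (PySem.List.pyGetD item 0 0) = true →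
    (∀ i ∈ L, 0 ≤ i ∧ i.toNat < res.length) →
    L.foldl (pvAStep resItems item) (res, toAdd, added) = (res, toAdd, added) := by
  intro L
  induction L with
  | nil => intro res toAdd added _ _ _; rfl
  | cons i L ih =>
    intro res toAdd added hheads hadded hrange
    have hi := hrange i (by simp)
    have hstep : pvAStep resItems item (res, toAdd, added) i = (res, toAdd, added) := by
      unfold pvAStep
      have hget : PySem.List.pyGetD res i [] = res[i.toNat] := pv_getD_idx _ _ hi.1 hi.2
      have hne : ¬ (PySem.List.pyGetD item 0 0 == PySem.List.pyGetD (PySem.List.pyGetD res i []) 0 0) = true := by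
        rw [hget, pv_hd_eq (res[i.toNat])]
        simp only [beq_iff_eq]
        exact fun h => hheads res[i.toNat] (List.getElem_mem hi.2) h.symm
      rw [if_neg hne, hadded]
      simp
    rw [List.foldl_cons, hstep]
    exact ih res toAdd added hheads hadded (fun j hj => hrange j (by simp [hj]))

-- the same over the full range(len(res))
theorem pv_A_skip (resItems item : List Int) (res toAdd : List (List Int)) (added : List Int)
    (hheads : ∀ l ∈ res, l.headD 0 ≠ PySem.List.pyGetD item 0 0)
    (hadded : added.contains (PySem.List.pyGetD item 0 0) = true) :
    (PySem.List.pyRange 0 (res.length : Int) 1).foldl (pvAStep resItems item) (res, toAdd, added)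
    = (res, toAdd, added) := by
  apply pv_A_inner_noop resItems item _ res toAdd added hheads hadded
  intro i hi
  rw [PySem.List.mem_pyRange_one] at hi
  omega

-- A's inner loop, new-value case: appended once (at i = 0), res untouched
theorem pv_A_inner_new (resItems item : List Int) (res toAdd : List (List Int)) (added : List Int)
    (hmem : resItems.contains (PySem.List.pyGetD item 0 0) = false)
    (hadd : added.contains (PySem.List.pyGetD item 0 0) = false)
    (hheads : ∀ l ∈ res, l.headD 0 ≠ PySem.List.pyGetD item 0 0)
    (hne : res ≠ []) :
    (PySem.List.pyRange 0 (res.length : Int) 1).foldl (pvAStep resItems item) (res, toAdd, added)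
    = (res, toAdd ++ [[PySem.List.pyGetD item 0 0, PySem.List.pyGetD item 1 0]],
       added ++ [PySem.List.pyGetD item 0 0]) := by
  have hlen : 0 < res.length := List.length_pos_of_ne_nil hne
  rw [PySem.List.pyRange_one_cons (by exact_mod_cast hlen)]
  have hstep : pvAStep resItems item (res, toAdd, added) 0
      = (res, toAdd ++ [[PySem.List.pyGetD item 0 0, PySem.List.pyGetD item 1 0]],
         added ++ [PySem.List.pyGetD item 0 0]) := by
    unfold pvAStep
    have hget : PySem.List.pyGetD res (0 : Int) [] = res[0] := pv_getD_idx _ _ le_rfl (by simpa)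
    have hne1 : ¬ (PySem.List.pyGetD item 0 0 == PySem.List.pyGetD (PySem.List.pyGetD res 0 []) 0 0) = true := by
      rw [hget, pv_hd_eq (res[0])]
      simp only [beq_iff_eq]
      exact fun h => hheads res[0] (List.getElem_mem hlen) h.symm
    rw [if_neg hne1, hmem, hadd]
    simp
  rw [List.foldl_cons, hstep]
  apply pv_A_inner_noop
  · exact hheads
  · simp
  · intro i hi
    rw [PySem.List.mem_pyRange_one] at hi
    omega

-- the per-entry effect of B's weight2 dict on an items1 entry
def pvApply (total : PySem.Dict Int Int) (l : List Int) : List Int :=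
  PySem.List.pySetD l 1 (PySem.List.pyGetD l 1 0 + total.getD (PySem.List.pyGetD l 0 0) 0)

theorem pv_apply_head (total : PySem.Dict Int Int) (l : List Int) :
    (pvApply total l).headD 0 = l.headD 0 := pv_set1_head l _

theorem pv_apply_empty (l : List Int) : pvApply PySem.Dict.empty l = l := by
  unfold pvApply
  rw [PySem.Dict.getD_empty, add_zero]
  cases l with
  | nil => rfl
  | cons a t =>
    cases t with
    | nil => rfl
    | cons b t => rw [pv_get1_cons, pv_set1_cons]

-- adding one items2 weight on top of the accumulated total
theorem pv_apply_upd (item : List Int) (total : PySem.Dict Int Int) (l : List Int)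
    (hhead : PySem.List.pyGetD l 0 0 = PySem.List.pyGetD item 0 0) :
    pvAUpd item (pvApply total l)
    = pvApply (total.insert (PySem.List.pyGetD item 0 0)
        (total.getD (PySem.List.pyGetD item 0 0) 0 + PySem.List.pyGetD item 1 0)) l := by
  unfold pvApply
  rw [hhead, PySem.Dict.getD_insert_self]
  unfold pvAUpd
  cases l with
  | nil => rfl
  | cons a t =>
    cases t with
    | nil => rfl
    | cons b t =>
      rw [pv_set1_cons, pv_get1_cons, pv_get1_cons, pv_set1_cons, pv_set1_cons, add_assoc]

-- an insert under a different key does not change the entry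
theorem pv_apply_other (total : PySem.Dict Int Int) (v x : Int) (l : List Int)
    (h : PySem.List.pyGetD l 0 0 ≠ v) :
    pvApply (total.insert v x) l = pvApply total l := by
  unfold pvApply
  rw [PySem.Dict.getD_insert_of_ne total x 0 h]

-- A's matched inner pass over the tracked state is one dict insert on B's side
theorem pv_map_step (item : List Int) (total : PySem.Dict Int Int) (items1 : List (List Int)) :
    (items1.map (pvApply total)).map
        (fun l => if PySem.List.pyGetD item 0 0 == l.headD 0 then pvAUpd item l else l)
    = items1.map (pvApply (total.insert (PySem.List.pyGetD item 0 0)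
        (total.getD (PySem.List.pyGetD item 0 0) 0 + PySem.List.pyGetD item 1 0))) := by
  rw [List.map_map]
  apply List.map_congr_left
  intro l _
  simp only [Function.comp_apply]
  rw [pv_apply_head]
  by_cases h : PySem.List.pyGetD l 0 0 = PySem.List.pyGetD item 0 0
  · rw [if_pos (by simp only [beq_iff_eq]; rw [← pv_hd_eq]; exact h.symm),
        pv_apply_upd item total l h]
  · rw [if_neg (by simp only [beq_iff_eq]; rw [← pv_hd_eq]; exact fun hh => h hh.symm),
        pv_apply_other total _ _ l h]

-- proof-side accumulator: the first items2 weight of each value absent from items1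
def pvFirstStep (headsL : List Int) (fd : PySem.Dict Int Int) (t : List Int) : PySem.Dict Int Int :=
  if headsL.contains (t.headD 0) || fd.contains (t.headD 0) then fd
  else fd.insert (t.headD 0) (t.getD 1 0)

-- the main loop invariant: A's (res, to_add, added) state tracks B's tally dict and the ghost first dict
theorem pv_main (items1 : List (List Int)) :
    ∀ (rest : List (List Int)) (total fd : PySem.Dict Int Int),
    items1 ≠ [] →
    (∀ v, fd.contains v = (total.contains v && !(items1.map (fun l => l.headD 0)).contains v)) →
    rest.foldl (pvAItem (items1.map (fun l => l.headD 0)))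
        (items1.map (pvApply total), fd.items.map (fun p => [p.1, p.2]), fd.keys)
    = (items1.map (pvApply (rest.foldl pvBTally total)),
       (rest.foldl (pvFirstStep (items1.map (fun l => l.headD 0))) fd).items.map (fun p => [p.1, p.2]),
       (rest.foldl (pvFirstStep (items1.map (fun l => l.headD 0))) fd).keys) := by
  intro rest
  induction rest with
  | nil => intro total fd _ _; rfl
  | cons t rest ih =>
    intro total fd hne hinv
    simp only [List.foldl_cons]
    have hu : t.headD 0 = PySem.List.pyGetD t 0 0 := (pv_hd_eq t).symm
    have hw : t.getD 1 0 = PySem.List.pyGetD t 1 0 := (pv_g1_eq t).symm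
    have hB : pvBTally total t = total.insert (PySem.List.pyGetD t 0 0)
        (total.getD (PySem.List.pyGetD t 0 0) 0 + PySem.List.pyGetD t 1 0) := rfl
    by_cases hc : (items1.map (fun l => l.headD 0)).contains (PySem.List.pyGetD t 0 0) = true
    · -- item[0] occurs among items1's values: in-place update on both sides
      have hF : pvFirstStep (items1.map (fun l => l.headD 0)) fd t = fd := by
        simp only [pvFirstStep, hu]
        rw [if_pos (by rw [hc]; rfl)]
      have hAit : pvAItem (items1.map (fun l => l.headD 0))
          (items1.map (pvApply total), fd.items.map (fun p => [p.1, p.2]), fd.keys) t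
          = (items1.map (pvApply (pvBTally total t)), fd.items.map (fun p => [p.1, p.2]), fd.keys) := by
        show (PySem.List.pyRange 0 (((items1.map (pvApply total)).length : Nat) : Int) 1).foldl _ _ = _
        rw [pv_A_inner_match _ t _ _ _ hc, pv_map_step, hB]
      rw [hAit, hF]
      apply ih _ fd hne
      intro v
      rw [hB, PySem.Dict.contains_insert]
      by_cases hvu : v = PySem.List.pyGetD t 0 0
      · subst hvu
        rw [hinv _, hc]
        simp
      · rw [hinv v, beq_eq_false_iff_ne.mpr hvu, Bool.false_or]
    · -- a value not present in items1
      have hcf : (items1.map (fun l => l.headD 0)).contains (PySem.List.pyGetD t 0 0) = false := by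
        simpa using hc
      have hnmem : PySem.List.pyGetD t 0 0 ∉ items1.map (fun l => l.headD 0) := by
        simpa using hcf
      have hheads2 : ∀ l ∈ items1.map (pvApply total), l.headD 0 ≠ PySem.List.pyGetD t 0 0 := by
        intro l hl heq
        obtain ⟨l0, hl0, rfl⟩ := List.mem_map.mp hl
        rw [pv_apply_head] at heq
        exact hnmem (heq ▸ List.mem_map_of_mem (f := fun l => l.headD 0) hl0)
      have hmapeq : items1.map (pvApply (pvBTally total t)) = items1.map (pvApply total) := by
        rw [hB]
        apply List.map_congr_left
        intro l hl
        apply pv_apply_other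
        rw [pv_hd_eq]
        exact fun h => hnmem (h ▸ List.mem_map_of_mem (f := fun l => l.headD 0) hl)
      by_cases hfc : fd.contains (PySem.List.pyGetD t 0 0) = true
      · -- seen before as an absent value: A skips entirely, B only bumps the tally
        have hF : pvFirstStep (items1.map (fun l => l.headD 0)) fd t = fd := by
          simp only [pvFirstStep, hu]
          rw [if_pos (by rw [hfc]; simp)]
        have hadded : fd.keys.contains (PySem.List.pyGetD t 0 0) = true := by
          simpa using (PySem.Dict.contains_iff_mem_keys fd _).mp hfc
        have hAit : pvAItem (items1.map (fun l => l.headD 0))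
            (items1.map (pvApply total), fd.items.map (fun p => [p.1, p.2]), fd.keys) t
            = (items1.map (pvApply total), fd.items.map (fun p => [p.1, p.2]), fd.keys) := by
          show (PySem.List.pyRange 0 (((items1.map (pvApply total)).length : Nat) : Int) 1).foldl _ _ = _
          rw [pv_A_skip _ t _ _ _ hheads2 hadded]
        rw [hAit, hF, ← hmapeq]
        apply ih _ fd hne
        intro v
        rw [hB, PySem.Dict.contains_insert]
        by_cases hvu : v = PySem.List.pyGetD t 0 0
        · subst hvu
          rw [hinv _, hcf] at hfc ⊢
          rw [beq_self_eq_true, Bool.true_or]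
          simpa using hfc
        · rw [hinv v, beq_eq_false_iff_ne.mpr hvu, Bool.false_or]
      · -- genuinely new absent value: appended on both sides
        have hfcf : fd.contains (PySem.List.pyGetD t 0 0) = false := by simpa using hfc
        have hkeysc : fd.keys.contains (PySem.List.pyGetD t 0 0) = false := by
          have : PySem.List.pyGetD t 0 0 ∉ fd.keys := fun h =>
            hfc ((PySem.Dict.contains_iff_mem_keys fd _).mpr h)
          simpa using this
        have hresne : items1.map (pvApply total) ≠ [] := by simpa using hne
        have hF : pvFirstStep (items1.map (fun l => l.headD 0)) fd t
            = fd.insert (PySem.List.pyGetD t 0 0) (PySem.List.pyGetD t 1 0) := by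
          simp only [pvFirstStep, hu, hw]
          rw [if_neg (by rw [hcf, hfcf]; simp)]
        have hAit : pvAItem (items1.map (fun l => l.headD 0))
            (items1.map (pvApply total), fd.items.map (fun p => [p.1, p.2]), fd.keys) t
            = (items1.map (pvApply total),
               fd.items.map (fun p => [p.1, p.2]) ++ [[PySem.List.pyGetD t 0 0, PySem.List.pyGetD t 1 0]],
               fd.keys ++ [PySem.List.pyGetD t 0 0]) := by
          show (PySem.List.pyRange 0 (((items1.map (pvApply total)).length : Nat) : Int) 1).foldl _ _ = _
          rw [pv_A_inner_new _ t _ _ _ hcf hkeysc hheads2 hresne]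
        have hitems : (fd.insert (PySem.List.pyGetD t 0 0) (PySem.List.pyGetD t 1 0)).items
            = fd.items ++ [(PySem.List.pyGetD t 0 0, PySem.List.pyGetD t 1 0)] :=
          PySem.Dict.items_insert_of_not_contains fd _ hfcf
        have hkeys2 : (fd.insert (PySem.List.pyGetD t 0 0) (PySem.List.pyGetD t 1 0)).keys
            = fd.keys ++ [PySem.List.pyGetD t 0 0] :=
          PySem.Dict.keys_insert_of_not_contains fd _ hfcf
        rw [hAit, hF, ← hmapeq]
        have hmi : fd.items.map (fun p => [p.1, p.2])
              ++ [[PySem.List.pyGetD t 0 0, PySem.List.pyGetD t 1 0]]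
            = (fd.insert (PySem.List.pyGetD t 0 0) (PySem.List.pyGetD t 1 0)).items.map
                (fun p => [p.1, p.2]) := by
          rw [hitems, List.map_append]
          rfl
        rw [hmi, ← hkeys2]
        apply ih _ _ hne
        intro v
        rw [hB, PySem.Dict.contains_insert, PySem.Dict.contains_insert]
        by_cases hvu : v = PySem.List.pyGetD t 0 0
        · subst hvu
          rw [beq_self_eq_true, Bool.true_or, Bool.true_or, hcf]
          simp
        · rw [beq_eq_false_iff_ne.mpr hvu, Bool.false_or, Bool.false_or, hinv v]

-- tally characterizations
theorem pv_tally_getD (v : Int) :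
    ∀ (l : List (List Int)) (st : PySem.Dict Int Int),
    (l.foldl pvBTally st).getD v 0
      = st.getD v 0 + ((l.filter (fun t => t.headD 0 == v)).map (fun t => t.getD 1 0)).sum := by
  intro l
  induction l with
  | nil => intro st; simp
  | cons t l ih =>
    intro st
    rw [List.foldl_cons]
    by_cases h : t.headD 0 = v
    · have hpt : (t.headD 0 == v) = true := beq_iff_eq.mpr h
      simp only [List.filter_cons, hpt, if_true, List.map_cons, List.sum_cons]
      rw [ih]
      simp only [pvBTally, pv_hd_eq, pv_g1_eq]
      rw [h, PySem.Dict.getD_insert_self]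
      ring
    · have hpf : (t.headD 0 == v) = false := beq_eq_false_iff_ne.mpr h
      simp only [List.filter_cons, hpf, Bool.false_eq_true, if_false]
      rw [ih]
      simp only [pvBTally, pv_hd_eq, pv_g1_eq]
      rw [PySem.Dict.getD_insert_of_ne st _ 0 (fun hh => h hh.symm)]

theorem pv_tally_keys (headsL : List Int) :
    ∀ (l : List (List Int)) (st fd : PySem.Dict Int Int),
    fd.keys = st.keys.filter (fun v => !headsL.contains v) →
    (l.foldl (pvFirstStep headsL) fd).keys
      = (l.foldl pvBTally st).keys.filter (fun v => !headsL.contains v) := by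
  intro l
  induction l with
  | nil => intro st fd h; exact h
  | cons t l ih =>
    intro st fd h
    rw [List.foldl_cons, List.foldl_cons]
    apply ih
    simp only [pvFirstStep, pvBTally, pv_hd_eq, pv_g1_eq]
    by_cases hh : headsL.contains (t.headD 0) = true
    · rw [if_pos (by rw [hh]; rfl)]
      by_cases hc : st.contains (t.headD 0) = true
      · rw [PySem.Dict.keys_insert_of_contains st _ hc]
        exact h
      · rw [PySem.Dict.keys_insert_of_not_contains st _ (by simpa using hc),
            List.filter_append, h]
        simp only [List.filter_cons, hh, Bool.not_true, Bool.false_eq_true, if_false,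
          List.filter_nil, List.append_nil]
    · have hhf : headsL.contains (t.headD 0) = false := by simpa using hh
      by_cases hc : st.contains (t.headD 0) = true
      · have hmem : t.headD 0 ∈ fd.keys := by
          rw [h]
          exact List.mem_filter.mpr ⟨(PySem.Dict.contains_iff_mem_keys st _).mp hc,
            by rw [hhf]; rfl⟩
        have hfc : fd.contains (t.headD 0) = true :=
          (PySem.Dict.contains_iff_mem_keys fd _).mpr hmem
        rw [if_pos (by rw [hfc]; simp), PySem.Dict.keys_insert_of_contains st _ hc]
        exact h
      · have hfc : fd.contains (t.headD 0) = false := by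
          by_contra hx
          have hx' : fd.contains (t.headD 0) = true := by simpa using hx
          have hmem := (PySem.Dict.contains_iff_mem_keys fd _).mp hx'
          rw [h] at hmem
          exact hc ((PySem.Dict.contains_iff_mem_keys st _).mpr (List.mem_filter.mp hmem).1)
        rw [if_neg (by rw [hhf, hfc]; simp),
            PySem.Dict.keys_insert_of_not_contains fd _ hfc,
            PySem.Dict.keys_insert_of_not_contains st _ (by simpa using hc),
            List.filter_append, h]
        simp only [List.filter_cons, hhf, Bool.not_false, if_true, List.filter_nil]

theorem pv_first_frozen (headsL : List Int) (v : Int) :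
    ∀ (l : List (List Int)) (fd : PySem.Dict Int Int), fd.contains v = true →
    (l.foldl (pvFirstStep headsL) fd).getD v 0 = fd.getD v 0 := by
  intro l
  induction l with
  | nil => intro fd _; rfl
  | cons t l ih =>
    intro fd h
    rw [List.foldl_cons]
    simp only [pvFirstStep]
    by_cases hg : (headsL.contains (t.headD 0) || fd.contains (t.headD 0)) = true
    · rw [if_pos hg]
      exact ih fd h
    · rw [if_neg hg]
      have hne : v ≠ t.headD 0 := by
        intro hvv
        exact hg (by rw [← hvv, h]; simp)
      rw [ih _ (by rw [PySem.Dict.contains_insert, h]; simp),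
          PySem.Dict.getD_insert_of_ne fd _ 0 hne]

theorem pv_first_getD (headsL : List Int) (v : Int) (hv : headsL.contains v = false) :
    ∀ (l : List (List Int)) (fd : PySem.Dict Int Int), fd.contains v = false →
    (l.foldl (pvFirstStep headsL) fd).getD v 0
      = (((l.filter (fun t => t.headD 0 == v)).map (fun t => t.getD 1 0)).headD 0) := by
  intro l
  induction l with
  | nil =>
    intro fd hfd
    rw [List.foldl_nil, PySem.Dict.getD_of_not_contains fd 0 hfd]
    rfl
  | cons t l ih =>
    intro fd hfd
    rw [List.foldl_cons]
    by_cases h : t.headD 0 = v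
    · have hpt : (t.headD 0 == v) = true := beq_iff_eq.mpr h
      simp only [List.filter_cons, hpt, if_true, List.map_cons, List.headD_cons]
      simp only [pvFirstStep, h, hv, hfd]
      rw [if_neg (by simp)]
      rw [pv_first_frozen headsL v l _ (by rw [PySem.Dict.contains_insert]; simp),
          PySem.Dict.getD_insert_self]
    · have hpf : (t.headD 0 == v) = false := beq_eq_false_iff_ne.mpr h
      simp only [List.filter_cons, hpf, Bool.false_eq_true, if_false]
      simp only [pvFirstStep]
      by_cases hg : (headsL.contains (t.headD 0) || fd.contains (t.headD 0)) = true
      · rw [if_pos hg]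
        exact ih fd hfd
      · rw [if_neg hg]
        apply ih
        rw [PySem.Dict.contains_insert, hfd]
        simp only [Bool.or_false, beq_eq_false_iff_ne]
        exact fun hh => h hh.symm

-- B's first-dict ghost loop keeps its keys unique
theorem pv_first_nodup (headsL : List Int) :
    ∀ (l : List (List Int)) (fd : PySem.Dict Int Int), fd.keys.Nodup →
    (l.foldl (pvFirstStep headsL) fd).keys.Nodup := by
  intro l
  induction l with
  | nil => intro fd h; exact h
  | cons t l ih =>
    intro fd h
    rw [List.foldl_cons]
    apply ih
    simp only [pvFirstStep]
    by_cases hg : (headsL.contains (t.headD 0) || fd.contains (t.headD 0)) = true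
    · rw [if_pos hg]; exact h
    · rw [if_neg hg]
      exact PySem.Dict.nodup_keys_insert _ _ _ h

-- ===== VERDICT (by name: the statement is the Claim_ definition above) =====
theorem mergeSimilarItems_spec : Claim_unchanged_mergeSimilarItems := by
  intro items1 items2 hdom hpre
  unfold Spec_mergeSimilarItems
  intro hD
  by_cases hnil : items1 = []
  · subst hnil
    have h2 : items2 = [] := by
      by_contra h
      exact hD (Or.inl ⟨rfl, h⟩)
    subst h2
    rfl
  · unfold mergeSimilarItems mergeSimilarItems_alt
    simp only [List.map_id']
    have hres : items1.map (fun item => PySem.List.pyGetD item 0 0)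
        = items1.map (fun l => l.headD 0) := List.map_congr_left (fun l _ => pv_hd_eq l)
    rw [hres]
    have hinit : items1.map (pvApply PySem.Dict.empty) = items1 :=
      (List.map_congr_left (fun l _ => pv_apply_empty l)).trans (List.map_id' items1)
    have hstart : (items1, ([] : List (List Int)), ([] : List Int))
        = (items1.map (pvApply PySem.Dict.empty),
           (PySem.Dict.empty : PySem.Dict Int Int).items.map (fun p => [p.1, p.2]),
           (PySem.Dict.empty : PySem.Dict Int Int).keys) := by
      rw [hinit]
      rfl
    rw [hstart, pv_main items1 items2 PySem.Dict.empty PySem.Dict.empty hnil (fun v => by simp)]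
    -- both sides now sort explicit lists; show the lists are equal
    have hrow : ∀ (w2 : PySem.Dict Int Int),
        items1.foldl (fun acc item => acc ++ [pvBRow w2 item]) []
        = items1.map (pvApply w2) := by
      intro w2
      rw [PySem.List.foldl_append_singleton_eq_map]
      simp only [List.nil_append]
      apply List.map_congr_left
      intro l _
      simp only [pvBRow, List.map_id']
      rfl
    have hsetc : ∀ v, PySem.Set.contains
        (PySem.Set.ofList (items1.map (fun l => l.headD 0))) v
        = (items1.map (fun l => l.headD 0)).contains v := by
      intro v
      simp [PySem.Set.contains, PySem.Set.mem_ofList]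
    have htnod : (items2.foldl pvBTally PySem.Dict.empty).keys.Nodup := by
      have hconv : items2.foldl pvBTally PySem.Dict.empty
          = items2.foldl (fun d x => d.insert (PySem.List.pyGetD x 0 0)
              (d.getD (PySem.List.pyGetD x 0 0) 0 + PySem.List.pyGetD x 1 0))
              PySem.Dict.empty := rfl
      rw [hconv]
      exact PySem.Dict.nodup_keys_foldl_insert_key items2 (fun x => PySem.List.pyGetD x 0 0) _
        PySem.Dict.empty (by simp)
    have hfdnod := pv_first_nodup (items1.map (fun l => l.headD 0)) items2 PySem.Dict.empty (by simp)
    have hkeysEq : (items2.foldl (pvFirstStep (items1.map (fun l => l.headD 0))) PySem.Dict.empty).keys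
        = (items2.foldl pvBTally PySem.Dict.empty).keys.filter
            (fun v => !(items1.map (fun l => l.headD 0)).contains v) :=
      pv_tally_keys (items1.map (fun l => l.headD 0)) items2 PySem.Dict.empty PySem.Dict.empty rfl
    have hvalEq : ∀ k, (items1.map (fun l => l.headD 0)).contains k = false →
        (items2.foldl (pvFirstStep (items1.map (fun l => l.headD 0))) PySem.Dict.empty).getD k 0
        = (items2.foldl pvBTally PySem.Dict.empty).getD k 0 := by
      intro k hk
      rw [pv_first_getD (items1.map (fun l => l.headD 0)) k hk items2 PySem.Dict.empty (by simp),
          pv_tally_getD k items2 PySem.Dict.empty, PySem.Dict.getD_empty, zero_add]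
      rcases hfl : items2.filter (fun t => t.headD 0 == k) with _ | ⟨f0, fs⟩
      · rw [hfl]
        rfl
      · rw [hfl]
        simp only [List.map_cons, List.headD_cons, List.sum_cons]
        have hmem2 : f0 ∈ items2.filter (fun t => t.headD 0 == k) := by
          rw [hfl]
          exact List.mem_cons_self
        have hf0mem : f0 ∈ items2 := (List.mem_filter.mp hmem2).1
        have hf0k : f0.headD 0 = k := beq_iff_eq.mp (List.mem_filter.mp hmem2).2
        have hnm : f0.headD 0 ∉ items1.map (fun t => t.headD 0) := by
          rw [hf0k]
          simpa using hk
        have hcount : ¬ 1 < items2.countP (fun t => t.headD 0 == f0.headD 0) := by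
          intro hx
          exact hD (Or.inr ⟨f0, hf0mem, hnm, hx⟩)
        rw [hf0k, List.countP_eq_length_filter, hfl, List.length_cons] at hcount
        have hfs : fs = [] := by
          cases fs with
          | nil => rfl
          | cons x xs => simp at hcount
        subst hfs
        simp
    have hfilter : ((items2.foldl pvBTally PySem.Dict.empty).items.filter
          (fun p => !(PySem.Set.contains (PySem.Set.ofList (items1.map (fun l => l.headD 0))) p.1)))
        = (items2.foldl (pvFirstStep (items1.map (fun l => l.headD 0))) PySem.Dict.empty).items := by
      rw [PySem.Dict.items_eq_map_keys _ htnod 0, PySem.Dict.items_eq_map_keys _ hfdnod 0,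
          List.filter_map, hkeysEq]
      rw [List.filter_congr (fun k _ => by
        show ((fun p : Int × Int =>
            !(PySem.Set.contains (PySem.Set.ofList (items1.map (fun l => l.headD 0))) p.1))
          ((fun k => (k, (items2.foldl pvBTally PySem.Dict.empty).getD k 0)) k))
          = (fun v => !(items1.map (fun l => l.headD 0)).contains v) k
        simp only [hsetc])]
      apply List.map_congr_left
      intro k hkmem
      have hk : (items1.map (fun l => l.headD 0)).contains k = false := by
        have := (List.mem_filter.mp hkmem).2
        simpa using this
      rw [hvalEq k hk]
    rw [hrow, hfilter]

theorem mergeSimilarItems_changed : Claim_changed_mergeSimilarItems := by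
  unfold Claim_changed_mergeSimilarItems; decide
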